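/- GENERATED by mk_final_copies.py from the proof of the farm's unit `decode_residue.4a` (farm:decode_residue.4a.1: Proof.lean) as the
   re-elaboration sweep compiled it — do not edit. -/
import Vorbis.Spec.Units.decode_residue_4a
import Vorbis.Spec.Worked.decode_residue_4a_Lemmas

open X86 X86.User Asan Vorbis Vorbis.Spec Vorbis.Spec.DecodeResidue

/-- Unit `decode_residue.4a`: everything of segment 4 but the call arm, as the five walks of Lemmas.lean (the worker of
decode_residue.4, attempt 1): `head_step` (the `while` head), `iloop_entry`, `iloop_head`, `body_front` (seven check sites), `neg_arm`
(the sign test of `b`, the `b < 0` arm, the latch). -/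
theorem Vorbis.Spec.Worked.decode_residue_4a_ok : Vorbis.Spec.decode_residue_4a.Statement := by
  intro Lay hLay μ hμ u₀ hcode h_load8 h_load4 h_load1 h_load2
  intro g hent
  refine ⟨?_, ?_, ?_, ?_, ?_⟩
  · intro pass cs pcount v hat
    exact Vorbis.Spec.decode_residue_4a.head_step hLay hμ hcode h_load4 hent pass cs pcount v hat
  · intro pass cs pcount v hat
    exact Vorbis.Spec.decode_residue_4a.iloop_entry hLay hμ hcode hent pass cs pcount v hat
  · intro pass cs i pcount v hat
    exact Vorbis.Spec.decode_residue_4a.iloop_head hLay hμ hcode hent pass cs i pcount v hat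
  · intro pass cs i pcount v hi hp hat
    exact Vorbis.Spec.decode_residue_4a.body_front hLay hμ hcode h_load8 h_load4 h_load1 h_load2 hent pass cs i pcount v hi hp hat
  · intro pass cs i pcount b v hat
    exact Vorbis.Spec.decode_residue_4a.neg_arm hLay hμ hcode hent pass cs i pcount b v hat
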